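-- pv_equiv track=rewrite | github.com/biyiyizuilihai/complex-document-rag | complex_document_rag/ingestion/tables.py | _format_logical_page_label
-- ===== SOURCE A (Python) =====
-- def _format_logical_page_label(page_labels: list[str]) -> str:
--     normalized = [str(label).strip() for label in page_labels if str(label).strip()]
--     if not normalized:
--         return ""
--     if len(normalized) == 1:
--         return normalized[0]
--     if all(label.isdigit() for label in normalized):
--         page_numbers = [int(label) for label in normalized]
--         if page_numbers == list(range(page_numbers[0], page_numbers[-1] + 1)):
--             return f"{page_numbers[0]}-{page_numbers[-1]}"
--     return ",".join(normalized)
-- ===== SOURCE B (Python) =====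
-- def _format_logical_page_label(page_labels: list[str]) -> str:
--     normalized = []
--     for label in page_labels:
--         s = str(label).strip()
--         if s:
--             normalized.append(s)
--     if not normalized:
--         return ""
--     head, tail = normalized[0], normalized[1:]
--     if not tail:
--         return head
--     if head.isdigit():
--         first = int(head)
--         prev = first
--         ok = True
--         for s in tail:
--             if s.isdigit() and int(s) == prev + 1:
--                 prev += 1
--             else:
--                 ok = False
--                 break
--         if ok:
--             return f"{first}-{prev}"
--     return ",".join(normalized)
-- ===== Notes on version B (the rewrite author's own statement) =====
-- stated objective: alternative
-- what changed: Replaces A's build-the-full-expected-range-and-compare check (plus a separate all-isdigit pass and an int-map pass) with one fused early-exit scan that checks digitness and consecutiveness of each successive label in a single pass.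
import Mathlib
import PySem

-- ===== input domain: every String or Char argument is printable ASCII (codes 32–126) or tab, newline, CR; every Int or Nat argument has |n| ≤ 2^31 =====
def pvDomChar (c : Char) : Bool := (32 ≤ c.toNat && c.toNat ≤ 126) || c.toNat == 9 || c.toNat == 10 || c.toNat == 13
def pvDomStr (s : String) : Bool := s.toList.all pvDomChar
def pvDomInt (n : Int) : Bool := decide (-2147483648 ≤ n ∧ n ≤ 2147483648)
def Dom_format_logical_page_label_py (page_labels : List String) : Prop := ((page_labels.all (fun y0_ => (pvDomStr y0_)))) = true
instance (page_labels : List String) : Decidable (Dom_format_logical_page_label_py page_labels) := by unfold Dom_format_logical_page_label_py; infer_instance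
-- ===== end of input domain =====

-- B replaces A's build-a-range-and-compare (after separate all-isdigit and int-map passes)
-- by one fused early-exit scan checking digitness and consecutiveness together (alternative decomposition).

-- ===== PORT A =====
-- int(label): inside the branch every label is all-digits, so ofStr? is some; getD 0 is unreachable
def pvIntOf (s : String) : Int := (PySem.Int.ofStr? s).getD 0

def format_logical_page_label_py (page_labels : List String) : String :=
  let normalized := page_labels.filterMap (fun label =>
    let s := PySem.Str.strip label
    if s = "" then none else some s)
  if normalized = [] then ""
  else if normalized.length = 1 then normalized.headD ""
  else if normalized.all (fun label => PySem.Str.strIsdigit label) then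
    let page_numbers := normalized.map pvIntOf
    -- page_numbers is nonempty here, so headD / getLast?.getD are exact for [0] / [-1]
    let first := page_numbers.headD 0
    let last := (page_numbers.getLast?).getD 0
    if page_numbers = PySem.List.pyRange first (last + 1) 1 then
      PySem.Int.toStr first ++ "-" ++ PySem.Int.toStr last
    else PySem.Str.join "," normalized
  else PySem.Str.join "," normalized

-- ===== PORT B =====
-- the for-loop with ok/break: returns some prev on normal exit, none on break
def pvScanConsec (prev : Int) (labels : List String) : Option Int :=
  match labels with
  | [] => some prev
  | s :: rest =>
    if PySem.Str.strIsdigit s && (pvIntOf s == prev + 1) then pvScanConsec (prev + 1) rest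
    else none

def format_logical_page_label_py_alt (page_labels : List String) : String :=
  let normalized := page_labels.foldl (fun acc label =>
    let s := PySem.Str.strip label
    if s = "" then acc else acc ++ [s]) []
  match normalized with
  | [] => ""
  | [x] => x
  | head :: tail =>
    if PySem.Str.strIsdigit head then
      let first := pvIntOf head
      match pvScanConsec first tail with
      | some prev => PySem.Int.toStr first ++ "-" ++ PySem.Int.toStr prev
      | none => PySem.Str.join "," normalized
    else PySem.Str.join "," normalized

-- ===== PRECONDITION & SPEC =====
def Spec_format_logical_page_label_py (page_labels : List String) (out : String) : Prop := out = format_logical_page_label_py_alt page_labels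
instance (page_labels : List String) (out : String) : Decidable (Spec_format_logical_page_label_py page_labels out) := by unfold Spec_format_logical_page_label_py; infer_instance

-- ===== CLAIM (what is proved, stated in full; the proofs are below) =====
def Claim_equal_format_logical_page_label_py : Prop := ∀ (page_labels : List String), Dom_format_logical_page_label_py page_labels → Spec_format_logical_page_label_py page_labels (format_logical_page_label_py page_labels)

-- ===== LEMMAS AND PROOFS =====

-- B's append-loop builds the same list as A's filterMap
theorem pv_norm_eq (ls : List String) (acc : List String) :
    ls.foldl (fun acc label =>
      let s := PySem.Str.strip label
      if s = "" then acc else acc ++ [s]) acc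
    = acc ++ ls.filterMap (fun label =>
      let s := PySem.Str.strip label
      if s = "" then none else some s) := by
  induction ls generalizing acc with
  | nil => simp
  | cons l rest ih =>
    simp only [List.foldl_cons, List.filterMap_cons]
    by_cases h : PySem.Str.strip l = "" <;> simp [h, ih]

-- characterisation of the scan: success ⟺ all digits and the values are the consecutive range
theorem pv_scan_iff (l : List String) (p q : Int) :
    pvScanConsec p l = some q ↔
      (l.all (fun s => PySem.Str.strIsdigit s) = true ∧
       l.map pvIntOf = PySem.List.pyRange (p + 1) (p + 1 + l.length) 1 ∧
       q = p + l.length) := by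
  induction l generalizing p with
  | nil => simp [pvScanConsec, PySem.List.pyRange_one_eq_nil]; omega
  | cons s rest ih =>
    simp only [pvScanConsec, List.map_cons, List.length_cons]
    rw [PySem.List.pyRange_one_cons (by push_cast; omega)]
    by_cases hd : PySem.Str.strIsdigit s = true
    · by_cases hv : pvIntOf s = p + 1
      · rw [if_pos (by rw [hd, hv]; simp), ih]
        simp only [List.all_cons, hd, Bool.true_and, List.cons.injEq]
        constructor
        · rintro ⟨h1, h2, h3⟩
          exact ⟨h1, ⟨hv, by rw [h2]; congr 1; push_cast; ring⟩, by push_cast; omega⟩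
        · rintro ⟨h1, ⟨_, h2⟩, h3⟩
          exact ⟨h1, by rw [h2]; congr 1; push_cast; ring, by push_cast at h3 ⊢; omega⟩
      · rw [if_neg (by rw [hd]; simp [hv])]
        simp only [List.cons.injEq]
        constructor
        · intro h; exact absurd h (by simp)
        · rintro ⟨_, ⟨h2, _⟩, _⟩; exact absurd h2 hv
    · rw [Bool.not_eq_true] at hd
      rw [if_neg (by rw [hd]; simp)]
      constructor
      · intro h; exact absurd h (by simp)
      · rintro ⟨h1, _, _⟩
        simp only [List.all_cons, hd, Bool.false_and, Bool.false_eq_true] at h1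

-- A's range equality, given all-digits, forces the scan to succeed at the last value
theorem pv_range_to_scan (a : String) (tl : List String)
    (hall : ((a :: tl).all (fun s => PySem.Str.strIsdigit s)) = true)
    (hrange : (a :: tl).map pvIntOf
      = PySem.List.pyRange (pvIntOf a) (((((a :: tl).map pvIntOf).getLast?).getD 0) + 1) 1) :
    pvScanConsec (pvIntOf a) tl = some ((((a :: tl).map pvIntOf).getLast?).getD 0) := by
  set first := pvIntOf a with hfirst
  set last := ((((a :: tl).map pvIntOf).getLast?).getD 0) with hlast
  have hlen : ((a :: tl).map pvIntOf).length = (last + 1 - first).toNat := by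
    rw [hrange]; exact PySem.List.length_pyRange_one _ _
  have hfl : first ≤ last := by
    simp only [List.length_map, List.length_cons] at hlen; omega
  have hlast' : last = first + tl.length := by
    simp only [List.length_map, List.length_cons] at hlen; omega
  rw [PySem.List.pyRange_one_cons (by omega), List.map_cons, List.cons.injEq] at hrange
  rw [pv_scan_iff]
  refine ⟨?_, ?_, by omega⟩
  · simp only [List.all_cons, Bool.and_eq_true] at hall
    exact hall.2
  · rw [hrange.2]; congr 1; omega

theorem pv_main (page_labels : List String) :
    format_logical_page_label_py page_labels = format_logical_page_label_py_alt page_labels := by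
  unfold format_logical_page_label_py format_logical_page_label_py_alt
  rw [pv_norm_eq]
  simp only [List.nil_append]
  generalize (page_labels.filterMap (fun label =>
    let s := PySem.Str.strip label
    if s = "" then none else some s)) = ns
  match ns with
  | [] => simp
  | [x] => simp
  | a :: b :: rest =>
    simp only [if_neg (by simp : ¬ (a :: b :: rest = [])),
      if_neg (by simp : ¬ (a :: b :: rest).length = 1)]
    by_cases hda : PySem.Str.strIsdigit a = true
    · rw [if_pos hda]
      rcases hscan : pvScanConsec (pvIntOf a) (b :: rest) with _ | q
      · -- scan failed: A's range test must fail too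
        by_cases hall : ((a :: b :: rest).all (fun label => PySem.Str.strIsdigit label)) = true
        · rw [if_pos hall]
          simp only [List.map_cons, List.headD_cons]
          rw [if_neg]
          intro hrange
          have := pv_range_to_scan a (b :: rest) hall (by simpa using hrange)
          rw [hscan] at this
          exact absurd this (by simp)
        · rw [if_neg hall]
      · -- scan succeeded with value q
        rw [pv_scan_iff] at hscan
        obtain ⟨hall, hmap, hq⟩ := hscan
        have hall' : ((a :: b :: rest).all (fun label => PySem.Str.strIsdigit label)) = true := by
          simp only [List.all_cons, hda, Bool.true_and]
          simpa using hall
        rw [if_pos hall']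
        simp only [List.map_cons, List.headD_cons]
        have hqlen : q = pvIntOf a + ((b :: rest).length : Int) := by simpa using hq
        have hmap' : (b :: rest).map pvIntOf = PySem.List.pyRange (pvIntOf a + 1) (q + 1) 1 := by
          rw [hmap]; congr 1; omega
        have hrangeeq : pvIntOf a :: (b :: rest).map pvIntOf
            = PySem.List.pyRange (pvIntOf a) (q + 1) 1 := by
          rw [PySem.List.pyRange_one_cons (by simp only [List.length_cons] at hqlen; omega)]
          rw [hmap']
        have hstep : PySem.List.pyRange (pvIntOf a) (q + 1) 1
            = PySem.List.pyRange (pvIntOf a) q 1 ++ [q] := by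
          simpa using PySem.List.pyRange_one_succ_right (a := pvIntOf a) (b := q)
            (by simp only [List.length_cons] at hqlen; omega)
        have hlastval : ((pvIntOf a :: (b :: rest).map pvIntOf).getLast?).getD 0 = q := by
          rw [hrangeeq, hstep]; simp
        simp only [List.map_cons] at hrangeeq hlastval
        rw [hlastval, if_pos hrangeeq]
    · rw [Bool.not_eq_true] at hda
      rw [if_neg (by
          intro h
          simp only [List.all_cons, Bool.and_eq_true] at h
          obtain ⟨h1, -⟩ := h
          rw [hda] at h1
          exact absurd h1 (by simp)),
        if_neg (by rw [hda]; simp)]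

-- ===== VERDICT (by name: the statement is the Claim_ definition above) =====
theorem format_logical_page_label_py_spec : Claim_equal_format_logical_page_label_py := by
  intro page_labels _
  exact pv_main page_labels
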